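-- pv_equiv track=rewrite | github.com/isaacmuss/practice_projects | Problem_3/riffle_shuffle.py | riffle
-- ===== SOURCE A (Python) =====
-- def riffle(items, out=True):
--     ''' Function to perform perfect riffle '''
--
--     # Get size of items list
--     size_items = int(len(items))
--
--     # Check if list has even number of elements
--     if size_items % 2 != 0:
--         raise ValueError(
--             'The number of items in the list is not even, try again')
--
--     # Determine out-shuffle or in-shuffle
--     if out == True:
--         items_0 = items[:int(size_items/2)]
--         items_1 = items[int(size_items/2):]
--     elif out == False:
--         items_1 = items[:int(size_items/2)]
--         items_0 = items[int(size_items/2):]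
--
--     # Construct list of lists with two halves of the original list
--     items_comp = [items_0, items_1]
--
--     # Perform the shuffle with list comprehension
--     new = [[row[i] for row in items_comp] for i in range(int(len(items_0)))]
--
--     # Flatten list with final result
--     new_final = [num for elem in new for num in elem]
--
--     return new_final
-- ===== SOURCE B (Python) =====
-- def riffle(items, out=True):
--     ''' Perfect riffle via strided scatter into a preallocated buffer '''
--     size_items = int(len(items))
--     if size_items % 2 != 0:
--         raise ValueError(
--             'The number of items in the list is not even, try again')
--     half = size_items // 2
--     if out == True:
--         items_0, items_1 = items[:half], items[half:]
--     elif out == False: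
--         items_1, items_0 = items[:half], items[half:]
--     result = [None] * size_items
--     result[0::2] = items_0
--     result[1::2] = items_1
--     return result
-- ===== Notes on version B (the rewrite author's own statement) =====
-- stated objective: idiomatic
-- what changed: Instead of gathering pairs by index into a nested list-of-lists and flattening it, B preallocates one flat result buffer and scatters each half into it with strided slice assignments result[0::2]/result[1::2].
import Mathlib
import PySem

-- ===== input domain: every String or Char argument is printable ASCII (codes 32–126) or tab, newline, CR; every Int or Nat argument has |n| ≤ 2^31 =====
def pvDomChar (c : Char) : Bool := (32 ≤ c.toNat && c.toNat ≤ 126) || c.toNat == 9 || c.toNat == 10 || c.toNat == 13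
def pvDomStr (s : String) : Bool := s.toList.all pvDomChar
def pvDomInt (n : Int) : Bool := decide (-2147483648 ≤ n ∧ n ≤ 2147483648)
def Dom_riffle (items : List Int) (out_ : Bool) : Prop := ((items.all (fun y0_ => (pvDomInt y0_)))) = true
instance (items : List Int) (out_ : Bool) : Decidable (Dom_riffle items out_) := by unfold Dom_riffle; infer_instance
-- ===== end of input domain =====

-- B scatters the two halves into one preallocated buffer by stride-2 slice assignment
-- instead of A's gather-into-nested-lists-and-flatten.

-- ===== PORT A =====
def riffle (items : List Int) (out_ : Bool) : List Int :=
  let sizeItems : Int := (items.length : Int)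
  -- Pre_riffle excludes odd sizeItems (Python: raise ValueError)
  let half : Int := PySem.Int.truncdiv sizeItems 2    -- int(size_items/2); exact: |sizeItems| < 2^53
  let items0 : List Int :=
    if out_ == true then PySem.List.slice items none (some half)
    else PySem.List.slice items (some half) none
  let items1 : List Int :=
    if out_ == true then PySem.List.slice items (some half) none
    else PySem.List.slice items none (some half)
  let itemsComp : List (List Int) := [items0, items1]
  let new : List (List Int) :=
    (PySem.List.pyRange 0 (items0.length : Int) 1).map
      (fun i => itemsComp.map (fun row => PySem.List.pyGetD row i 0))  -- row[i]: in range under Pre_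
  new.flatten

-- ===== PORT B =====
-- result[start::2] = vals : overwrite every second slot from `start` with the next value of `vals`
def setStride2 : Nat → List Int → List Int → List Int
  | _, res, [] => res
  | 0, [], _ => []
  | 0, _ :: rest, v :: vs => v :: setStride2 1 rest vs
  | _ + 1, [], _ => []
  | k + 1, r :: rest, vs => r :: setStride2 k rest vs

def riffle_alt (items : List Int) (out_ : Bool) : List Int :=
  let sizeItems : Nat := items.length
  -- Pre_riffle excludes odd sizeItems (Python: raise ValueError)
  let half : Nat := sizeItems / 2
  let items0 : List Int := if out_ == true then items.take half else items.drop half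
  let items1 : List Int := if out_ == true then items.drop half else items.take half
  let result : List Int := List.replicate sizeItems 0     -- [None] * size_items; every slot overwritten
  setStride2 1 (setStride2 0 result items0) items1

-- ===== PRECONDITION & SPEC =====
-- Pre_ excludes odd-length lists, on which Python A raises ValueError.
def Pre_riffle (items : List Int) (out_ : Bool) : Prop := items.length % 2 = 0
instance (items : List Int) (out_ : Bool) : Decidable (Pre_riffle items out_) := by
  unfold Pre_riffle; infer_instance

def pvWitness_riffle : List Int × Bool := ([1, 2, 3, 4], true)

def Spec_riffle (items : List Int) (out_ : Bool) (out : List Int) : Prop := out = riffle_alt items out_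
instance (items : List Int) (out_ : Bool) (out : List Int) : Decidable (Spec_riffle items out_ out) := by unfold Spec_riffle; infer_instance

-- ===== CLAIM (what is proved, stated in full; the proofs are below) =====
def Claim_equal_riffle : Prop := ∀ (items : List Int) (out_ : Bool), Dom_riffle items out_ → Pre_riffle items out_ → Spec_riffle items out_ (riffle items out_)

-- ===== LEMMAS AND PROOFS =====

-- canonical interleaving of two equal-length lists (proof-side only)
def itl : List Int → List Int → List Int
  | [], _ => []
  | _ :: _, [] => []
  | x :: xs, y :: ys => x :: y :: itl xs ys

theorem truncdiv_natCast_two (n : Nat) :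
    PySem.Int.truncdiv (n : Int) 2 = ((n / 2 : Nat) : Int) := by
  simp [PySem.Int.truncdiv, Int.tdiv_eq_ediv_of_nonneg (by positivity : (0:Int) ≤ (n:Int))]

theorem gather_eq_itl (a b : List Int) (h : a.length = b.length) :
    ((PySem.List.pyRange 0 (a.length : Int) 1).map
        (fun i => [a, b].map (fun row => PySem.List.pyGetD row i 0))).flatten = itl a b := by
  rw [PySem.List.pyRange_zero_natCast]
  induction a generalizing b with
  | nil => cases b with
    | nil => rfl
    | cons y ys => simp at h
  | cons x xs ih =>
    cases b with
    | nil => simp at h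
    | cons y ys =>
      have hx := ih ys (by simpa using h)
      simp only [List.length_cons, List.range_succ_eq_map, List.map_cons, List.map_map,
        List.flatten_cons, List.map_nil] at hx ⊢
      simp only [Function.comp_def, Nat.succ_eq_add_one, PySem.List.pyGetD_natCast,
        Nat.cast_zero, List.getD_eq_getElem?_getD] at hx ⊢
      simp [itl, PySem.List.pyGetD_zero_cons, hx]

theorem setStride2_one_cons (r : Int) (rest xs : List Int) :
    setStride2 1 (r :: rest) xs = r :: setStride2 0 rest xs := by
  cases xs <;> simp [setStride2]

theorem scatter_eq_itl (a b : List Int) (h : a.length = b.length) :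
    setStride2 1 (setStride2 0 (List.replicate (a.length + b.length) 0) a) b = itl a b := by
  induction a generalizing b with
  | nil =>
    cases b with
    | nil => rfl
    | cons y ys => simp at h
  | cons x xs ih =>
    cases b with
    | nil => simp at h
    | cons y ys =>
      have hlen : (x :: xs).length + (y :: ys).length = (xs.length + ys.length) + 1 + 1 := by
        simp; omega
      rw [hlen, List.replicate_succ, List.replicate_succ]
      have h1 : setStride2 0 (0 :: 0 :: List.replicate (xs.length + ys.length) 0) (x :: xs)
          = x :: 0 :: setStride2 0 (List.replicate (xs.length + ys.length) 0) xs := by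
        rw [show setStride2 0 (0 :: 0 :: List.replicate (xs.length + ys.length) 0) (x :: xs)
              = x :: setStride2 1 (0 :: List.replicate (xs.length + ys.length) 0) xs from rfl,
            setStride2_one_cons]
      rw [h1,
        show setStride2 1 (x :: 0 :: setStride2 0 (List.replicate (xs.length + ys.length) 0) xs) (y :: ys)
          = x :: y :: setStride2 1 (setStride2 0 (List.replicate (xs.length + ys.length) 0) xs) ys from rfl,
        ih ys (by simpa using h)]
      rfl

-- ===== VERDICT (by name: the statement is the Claim_ definition above) =====
theorem interleave_halves (items : List Int) (m : Nat)
    (hlen : items.length = m + m) :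
    ((PySem.List.pyRange 0 ((items.take m).length : Int) 1).map
        (fun i => [items.take m, items.drop m].map (fun row => PySem.List.pyGetD row i 0))).flatten
      = setStride2 1 (setStride2 0 (List.replicate items.length 0) (items.take m)) (items.drop m) := by
  have hm : m ≤ items.length := by omega
  have h1 : (items.take m).length = (items.drop m).length := by
    simp [List.length_take, List.length_drop]; omega
  have h2 : items.length = (items.take m).length + (items.drop m).length := by
    simp [List.length_take, List.length_drop]; omega
  rw [gather_eq_itl _ _ h1, h2, scatter_eq_itl _ _ h1]

theorem riffle_spec : Claim_equal_riffle := by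
  intro items out_ _ hpre
  unfold Spec_riffle
  obtain ⟨m, hm⟩ : ∃ m, items.length = m + m := by
    refine ⟨items.length / 2, ?_⟩
    have := hpre
    unfold Pre_riffle at this
    omega
  simp only [riffle, riffle_alt, truncdiv_natCast_two,
    PySem.List.slice_to_natCast, PySem.List.slice_from_natCast]
  have hdiv : items.length / 2 = m := by omega
  rw [hdiv]
  cases out_ with
  | true =>
    simp only [BEq.rfl, if_true]
    exact interleave_halves items m hm
  | false =>
    simp only [show (false == true) = false from rfl, Bool.false_eq_true, if_false]
    have h1 : (items.drop m).length = (items.take m).length := by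
      simp [List.length_take, List.length_drop]; omega
    have h2 : items.length = (items.drop m).length + (items.take m).length := by
      simp [List.length_take, List.length_drop]; omega
    rw [gather_eq_itl _ _ h1, h2, scatter_eq_itl _ _ h1]
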